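-- pv_equiv track=rewrite | github.com/it-is-not-tytorka/FlaskProject | app/models.py | swap_elements
-- ===== SOURCE A (Python) =====
-- def swap_elements(first_el_id: int, second_el_id: int, old_dict: dict) -> dict:
--     new_dict = {}
--     try:
--         data_first_el = old_dict[first_el_id]
--         data_second_el = old_dict[second_el_id]
--         for key in old_dict:
--             if key == first_el_id:
--                 new_dict[second_el_id] = data_second_el
--             elif key == second_el_id:
--                 new_dict[first_el_id] = data_first_el
--             else:
--                 new_dict[key] = old_dict[key]
--         return new_dict
--     except IndexError:
--         return None
-- ===== SOURCE B (Python) =====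
-- def swap_elements(first_el_id: int, second_el_id: int, old_dict: dict) -> dict:
--     items = list(old_dict.items())
--     keys = [k for k, _ in items]
--     i = keys.index(first_el_id)
--     j = keys.index(second_el_id)
--     items[i], items[j] = items[j], items[i]
--     return dict(items)
-- ===== Notes on version B (the rewrite author's own statement) =====
-- stated objective: alternative
-- what changed: A rebuilds the dict entry by entry with a three-way branch on every key; B lists the items once, finds the positions of the two keys with list.index, swaps the two (key, value) pairs in place and rebuilds the dict from the swapped list.
import Mathlib
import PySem

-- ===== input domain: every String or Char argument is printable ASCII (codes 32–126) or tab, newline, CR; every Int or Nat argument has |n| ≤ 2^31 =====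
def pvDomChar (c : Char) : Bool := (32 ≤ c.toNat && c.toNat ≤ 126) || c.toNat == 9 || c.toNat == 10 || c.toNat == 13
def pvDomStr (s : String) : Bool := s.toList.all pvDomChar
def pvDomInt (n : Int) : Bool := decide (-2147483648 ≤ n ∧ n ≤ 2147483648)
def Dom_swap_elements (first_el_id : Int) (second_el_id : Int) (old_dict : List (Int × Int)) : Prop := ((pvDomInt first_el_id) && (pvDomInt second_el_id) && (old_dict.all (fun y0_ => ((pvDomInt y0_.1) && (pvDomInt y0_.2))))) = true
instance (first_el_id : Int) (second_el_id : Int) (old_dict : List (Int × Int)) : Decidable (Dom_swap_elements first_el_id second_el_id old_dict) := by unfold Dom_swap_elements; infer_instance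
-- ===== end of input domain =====

-- B replaces A's per-key branching rebuild of the dict by listing the items, locating the two keys'
-- positions and swapping the two (key, value) pairs in place (objective: alternative decomposition).


-- ===== PORT A =====
-- old_dict[first_el_id] / old_dict[second_el_id] raise KeyError when missing (the 'except IndexError'
-- branch is dead code: KeyError is not an IndexError) → none here; the loop inserts into new_dict.
def swap_elements (first_el_id : Int) (second_el_id : Int) (old_dict : List (Int × Int)) : Option (List (Int × Int)) :=
  match (PySem.Dict.ofList old_dict).get? first_el_id, (PySem.Dict.ofList old_dict).get? second_el_id with
  | some data_first_el, some data_second_el =>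
      some (((PySem.Dict.ofList old_dict).items.foldl (fun nd p =>
          if p.1 = first_el_id then nd.insert second_el_id data_second_el
          else if p.1 = second_el_id then nd.insert first_el_id data_first_el
          else nd.insert p.1 p.2) PySem.Dict.empty).items)
  | _, _ => none

-- ===== PORT B =====
-- list(old_dict.items()); keys.index(...) twice; swap the two pairs; dict(items).
def swap_elements_alt (first_el_id : Int) (second_el_id : Int) (old_dict : List (Int × Int)) : Option (List (Int × Int)) :=
  match PySem.List.index? ((PySem.Dict.ofList old_dict).items.map (fun p => p.1)) first_el_id with
  | none => none
  | some i =>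
    match PySem.List.index? ((PySem.Dict.ofList old_dict).items.map (fun p => p.1)) second_el_id with
    | none => none
    | some j =>
        some ((PySem.Dict.ofList
          (PySem.List.pySetD
            (PySem.List.pySetD (PySem.Dict.ofList old_dict).items (i : Int)
              (PySem.List.pyGetD (PySem.Dict.ofList old_dict).items (j : Int) (0, 0)))
            (j : Int)
            (PySem.List.pyGetD (PySem.Dict.ofList old_dict).items (i : Int) (0, 0)))).items)

-- ===== PRECONDITION & SPEC =====
-- Pre_ excludes exactly the inputs on which the Python A raises (KeyError: a requested key absent
-- from the dict); B raises there too (ValueError from .index).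
def Pre_swap_elements (first_el_id : Int) (second_el_id : Int) (old_dict : List (Int × Int)) : Prop :=
  first_el_id ∈ old_dict.map Prod.fst ∧ second_el_id ∈ old_dict.map Prod.fst
instance (first_el_id : Int) (second_el_id : Int) (old_dict : List (Int × Int)) : Decidable (Pre_swap_elements first_el_id second_el_id old_dict) := by unfold Pre_swap_elements; infer_instance

def pvWitness_swap_elements : Int × Int × (List (Int × Int)) := (1, 2, [(1, 10), (2, 20), (3, 30)])

def Spec_swap_elements (first_el_id : Int) (second_el_id : Int) (old_dict : List (Int × Int)) (out : Option (List (Int × Int))) : Prop := out = swap_elements_alt first_el_id second_el_id old_dict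
instance (first_el_id : Int) (second_el_id : Int) (old_dict : List (Int × Int)) (out : Option (List (Int × Int))) : Decidable (Spec_swap_elements first_el_id second_el_id old_dict out) := by unfold Spec_swap_elements; infer_instance

-- ===== CLAIM (what is proved, stated in full; the proofs are below) =====
def Claim_equal_swap_elements : Prop := ∀ (first_el_id : Int) (second_el_id : Int) (old_dict : List (Int × Int)), Dom_swap_elements first_el_id second_el_id old_dict → Pre_swap_elements first_el_id second_el_id old_dict → Spec_swap_elements first_el_id second_el_id old_dict (swap_elements first_el_id second_el_id old_dict)

-- ===== LEMMAS AND PROOFS =====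

-- the key relabelling both programs perform: f ↦ s, s ↦ f, others fixed
def pvSwapKey (f s x : Int) : Int := if x = f then s else if x = s then f else x

theorem pvSwapKey_inj (f s : Int) : Function.Injective (pvSwapKey f s) := by
  intro a b h
  unfold pvSwapKey at h
  split_ifs at h <;> omega

-- A's loop maps each item through g := fun p => if p.1 = f then (s, v2) else if p.1 = s then (f, v1) else p
theorem pvItems_map_keys_nodup {m : List (Int × Int)} (h : (m.map Prod.fst).Nodup)
    (f s : Int) (v1 v2 : Int) :
    (m.map (fun p => ((if p.1 = f then ((s, v2) : Int × Int) else if p.1 = s then (f, v1) else p).1))).Nodup := by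
  have : (fun (p : Int × Int) => ((if p.1 = f then ((s, v2) : Int × Int) else if p.1 = s then (f, v1) else p).1))
      = (pvSwapKey f s) ∘ Prod.fst := by
    funext p; by_cases h1 : p.1 = f <;> by_cases h2 : p.1 = s <;>
      first | (simp [pvSwapKey, h1, h2]; split_ifs <;> rfl) | simp [pvSwapKey, h1, h2]
  rw [this, ← List.map_map]
  exact h.map (pvSwapKey_inj f s)

-- items of ofList of a list with distinct keys is the list itself
theorem pvItems_ofList_of_nodup (m : List (Int × Int)) (h : (m.map Prod.fst).Nodup) :
    (PySem.Dict.ofList m).items = m := by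
  have := PySem.Dict.items_foldl_insert_fresh m Prod.fst Prod.snd PySem.Dict.empty
    (fun a _ => by simp [PySem.Dict.contains_empty]) h
  simpa [PySem.Dict.ofList, PySem.Dict.update] using this

theorem pvMem_keys_ofList (m : List (Int × Int)) (k : Int) :
    k ∈ (PySem.Dict.ofList m).keys ↔ k ∈ m.map Prod.fst := by
  have h : (PySem.Dict.ofList m).keys = PySem.Set.update (PySem.Dict.empty : PySem.Dict Int Int).keys (m.map Prod.fst) :=
    PySem.Dict.keys_foldl_insert_key m Prod.fst (fun _ p => p.2) PySem.Dict.empty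
  rw [h, PySem.Dict.keys_empty]
  rw [PySem.Set.mem_update [] (m.map Prod.fst) k]
  simp

theorem swap_elements_spec : Claim_equal_swap_elements := by
  intro f s old _hdom hpre
  unfold Spec_swap_elements swap_elements swap_elements_alt
  obtain ⟨hf, hs⟩ := hpre
  set d := PySem.Dict.ofList old with hd
  set l := d.items with hl
  have hkeys : d.keys = l.map Prod.fst := rfl
  have hnd : (l.map Prod.fst).Nodup := by
    have := PySem.Dict.nodup_keys_ofList old
    rwa [← hd, hkeys] at this
  -- both keys are really in the dict
  have hfk : f ∈ l.map Prod.fst := by rw [← hkeys]; exact (pvMem_keys_ofList old f).2 hf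
  have hsk : s ∈ l.map Prod.fst := by rw [← hkeys]; exact (pvMem_keys_ofList old s).2 hs
  -- the two indices B finds
  obtain ⟨i, hi⟩ : ∃ i, PySem.List.index? (l.map (fun p => p.1)) f = some i := by
    have := (List.isSome_idxOf? (l := l.map Prod.fst) (a := f)).2 hfk
    exact Option.isSome_iff_exists.1 this
  obtain ⟨j, hj⟩ : ∃ j, PySem.List.index? (l.map (fun p => p.1)) s = some j := by
    have := (List.isSome_idxOf? (l := l.map Prod.fst) (a := s)).2 hsk
    exact Option.isSome_iff_exists.1 this
  obtain ⟨hilt, hif, -⟩ := List.idxOf?_eq_some_iff.1 hi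
  obtain ⟨hjlt, hjs, -⟩ := List.idxOf?_eq_some_iff.1 hj
  have hilt' : i < l.length := by simpa using hilt
  have hjlt' : j < l.length := by simpa using hjlt
  have hif' : (l[i]'hilt').1 = f := by simpa using hif
  have hjs' : (l[j]'hjlt').1 = s := by simpa using hjs
  -- A's lookups succeed, with the values stored at positions i and j
  have hg1 : d.get? f = some (l[i]'hilt').2 := by
    apply PySem.Dict.get?_of_mem_items
    · have : (l[i]'hilt') ∈ l := List.getElem_mem hilt'
      rwa [show ((f, (l[i]'hilt').2) : Int × Int) = l[i]'hilt' from by rw [← hif']] 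
    · rwa [hkeys]
  have hg2 : d.get? s = some (l[j]'hjlt').2 := by
    apply PySem.Dict.get?_of_mem_items
    · have : (l[j]'hjlt') ∈ l := List.getElem_mem hjlt'
      rwa [show ((s, (l[j]'hjlt').2) : Int × Int) = l[j]'hjlt' from by rw [← hjs']]
    · rwa [hkeys]
  rw [hg1, hg2, hi, hj]
  dsimp only
  set v1 := (l[i]'hilt').2 with hv1
  set v2 := (l[j]'hjlt').2 with hv2
  -- A's fold appends fresh keys: its items are l mapped through g
  have hbody : (fun (nd : PySem.Dict Int Int) (p : Int × Int) =>
        if p.1 = f then nd.insert s v2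
        else if p.1 = s then nd.insert f v1
        else nd.insert p.1 p.2)
      = (fun nd p =>
        nd.insert (if p.1 = f then ((s, v2) : Int × Int) else if p.1 = s then (f, v1) else p).1
                  (if p.1 = f then ((s, v2) : Int × Int) else if p.1 = s then (f, v1) else p).2) := by
    funext nd p
    by_cases h1 : p.1 = f <;> by_cases h2 : p.1 = s <;> first | (simp [h1, h2]; split_ifs <;> rfl) | simp [h1, h2]
  have hA : (l.foldl (fun nd p =>
        if p.1 = f then nd.insert s v2
        else if p.1 = s then nd.insert f v1
        else nd.insert p.1 p.2) PySem.Dict.empty).items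
      = l.map (fun p => if p.1 = f then ((s, v2) : Int × Int) else if p.1 = s then (f, v1) else p) := by
    rw [hbody]
    have := PySem.Dict.items_foldl_insert_fresh l
      (fun p => (if p.1 = f then ((s, v2) : Int × Int) else if p.1 = s then (f, v1) else p).1)
      (fun p => (if p.1 = f then ((s, v2) : Int × Int) else if p.1 = s then (f, v1) else p).2)
      PySem.Dict.empty (fun a _ => by simp [PySem.Dict.contains_empty])
      (pvItems_map_keys_nodup hnd f s v1 v2)
    simpa using this
  rw [hA]
  -- B's swapped list
  have hget_i : PySem.List.pyGetD l (i : Int) ((0 : Int), (0 : Int)) = l[i]'hilt' := by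
    rw [PySem.List.pyGetD_natCast]; exact List.getD_eq_getElem l _ hilt'
  have hget_j : PySem.List.pyGetD l (j : Int) ((0 : Int), (0 : Int)) = l[j]'hjlt' := by
    rw [PySem.List.pyGetD_natCast]; exact List.getD_eq_getElem l _ hjlt'
  rw [hget_i, hget_j, PySem.List.pySetD_natCast, PySem.List.pySetD_natCast]
  set w := (l.set i (l[j]'hjlt')).set j (l[i]'hilt') with hw
  -- the swapped list equals l mapped through g …
  have hmap : l.map (fun p => if p.1 = f then ((s, v2) : Int × Int) else if p.1 = s then (f, v1) else p) = w := by
    apply List.ext_getElem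
    · simp [hw]
    · intro k hk1 hk2
      have hkl : k < l.length := by simpa using hk1
      have hset : w[k]'hk2 = if j = k then l[i]'hilt' else if i = k then l[j]'hjlt' else l[k]'hkl := by
        show ((l.set i (l[j]'hjlt')).set j (l[i]'hilt'))[k]'(by simpa using hkl) = _
        rw [List.getElem_set]
        by_cases hjk : j = k
        · simp [hjk]
        · simp only [hjk, if_false]
          rw [List.getElem_set]
      rw [hset]
      have hmapk : (l.map (fun p => if p.1 = f then ((s, v2) : Int × Int) else if p.1 = s then (f, v1) else p))[k]'hk1
          = if (l[k]'hkl).1 = f then ((s, v2) : Int × Int) else if (l[k]'hkl).1 = s then (f, v1) else l[k]'hkl := by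
        simp
      rw [hmapk]
      -- uniqueness of key positions
      have huniq : ∀ (k' : Nat) (hk' : k' < l.length) (x : Int),
          (l[k']'hk').1 = x → ∀ (k'' : Nat) (hk'' : k'' < l.length), (l[k'']'hk'').1 = x → k' = k'' := by
        intro k' hk' x hx k'' hk'' hx'
        have h1 : (l.map Prod.fst)[k']'(by simpa using hk') = x := by simpa using hx
        have h2 : (l.map Prod.fst)[k'']'(by simpa using hk'') = x := by simpa using hx'
        exact hnd.getElem_inj_iff.1 (h1.trans h2.symm)
      by_cases hjk : j = k
      · -- position of s: gets the pair from position i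
        subst hjk
        have hkey : (l[j]'hjlt').1 = s := hjs'
        by_cases hfs : f = s
        · have hij : i = j := huniq i hilt' f hif' j hjlt' (by rw [hjs', hfs])
          subst hij
          simp only [hkey, hfs]
          by_cases h' : s = f
          · ext <;> simp [h', hif', hv2]
          · ext <;> simp [hif', hv2, hfs] 
        · have hne : s ≠ f := fun h => hfs h.symm
          simp only [hkey, hne, if_false]
          ext <;> simp [hif', hv1]
      · by_cases hik : i = k
        · subst hik
          simp only [hjk, if_false, hif']
          by_cases hfs : f = s
          · have hij : i = j := huniq i hilt' f hif' j hjlt' (by rw [hjs', hfs])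
            exact absurd hij.symm hjk
          · ext <;> simp [hjs', hv2]
        · have hne1 : (l[k]'hkl).1 ≠ f := fun h => hik (huniq i hilt' f hif' k hkl h)
          have hne2 : (l[k]'hkl).1 ≠ s := fun h => hjk (huniq j hjlt' s hjs' k hkl h)
          simp [hjk, hik, hne1, hne2]
  rw [hmap]
  -- … whose keys are still distinct, so dict(items) reproduces it
  congr 1
  refine (pvItems_ofList_of_nodup _ ?_).symm
  rw [← hmap, List.map_map]
  exact pvItems_map_keys_nodup hnd f s v1 v2
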